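-- pv_equiv track=rewrite | github.com/ChartinoLabs/Muninn | src/muninn/parsers/juniper_junos/show_bgp_summary.py | _strip_noise
-- ===== SOURCE A (Python) =====
-- def _is_noise_line(stripped: str) -> bool:
--     """Return True if a stripped line is noise (prompt, empty, etc.)."""
--     if not stripped:
--         return True
--     if stripped.endswith("#") or "#show " in stripped.lower():
--         return True
--     # Table header line
--     if stripped.startswith("Table ") and "Tot Paths" in stripped:
--         return True
--     return False
--
-- def _strip_noise(lines: list[str]) -> list[str]:
--     """Strip leading and trailing noise lines."""
--     result: list[str] = []
--     started = False
--     for line in lines: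
--         if not started:
--             if _is_noise_line(line.strip()):
--                 continue
--             started = True
--         result.append(line)
--
--     while result and _is_noise_line(result[-1].strip()):
--         result.pop()
--
--     return result
-- ===== SOURCE B (Python) =====
-- def _is_noise_line(stripped: str) -> bool:
--     """Return True if a stripped line is noise (prompt, empty, etc.)."""
--     if not stripped:
--         return True
--     if stripped.endswith("#") or "#show " in stripped.lower():
--         return True
--     if stripped.startswith("Table ") and "Tot Paths" in stripped:
--         return True
--     return False
--
-- def _strip_noise(lines: list[str]) -> list[str]:
--     """Find the first and last non-noise line and slice between them."""
--     i = 0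
--     while i < len(lines) and _is_noise_line(lines[i].strip()):
--         i += 1
--     j = len(lines)
--     while j > i and _is_noise_line(lines[j - 1].strip()):
--         j -= 1
--     return lines[i:j]
-- ===== Notes on version B (the rewrite author's own statement) =====
-- stated objective: simpler
-- what changed: B computes the index of the first and of the last non-noise line with two boundary scans and returns one slice, instead of A's forward flag-loop accumulating a result list and then popping trailing noise.
import Mathlib
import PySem

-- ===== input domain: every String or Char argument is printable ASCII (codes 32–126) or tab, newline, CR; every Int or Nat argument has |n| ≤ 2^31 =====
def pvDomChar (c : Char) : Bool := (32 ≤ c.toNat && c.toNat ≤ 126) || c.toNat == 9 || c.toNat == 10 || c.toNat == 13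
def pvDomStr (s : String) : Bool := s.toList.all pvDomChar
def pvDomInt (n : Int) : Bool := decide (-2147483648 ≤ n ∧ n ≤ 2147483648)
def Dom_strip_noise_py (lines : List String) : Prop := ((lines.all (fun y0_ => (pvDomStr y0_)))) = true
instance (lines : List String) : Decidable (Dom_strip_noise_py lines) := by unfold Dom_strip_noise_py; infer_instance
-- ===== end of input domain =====

-- B trims by two boundary scans (first/last non-noise index) and one slice, instead of
-- A's forward flag-loop building a result list and then popping trailing noise. Same result, same cost.

-- ===== PORT A =====
-- shared helper _is_noise_line (used verbatim by both Pythons)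
def isNoiseLine (stripped : String) : Bool :=
  if stripped == "" then true
  else if PySem.Str.endswith stripped "#" || PySem.Str.isIn "#show " (PySem.Str.lower stripped) then true
  else if PySem.Str.startswith stripped "Table " && PySem.Str.isIn "Tot Paths" stripped then true
  else false

-- A's forward loop: 'started' flag + accumulator
def stripLoopA : List String → Bool → List String → List String
  | [], _, result => result
  | line :: rest, started, result =>
    if !started then
      if isNoiseLine (PySem.Str.strip line) then stripLoopA rest started result
      else stripLoopA rest true (result ++ [line])
    else stripLoopA rest started (result ++ [line])

-- A's 'while result and _is_noise_line(result[-1].strip()): result.pop()'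
def popTrailingA (result : List String) : List String :=
  if h : result = [] then result
  else if isNoiseLine (PySem.Str.strip (result.getLast h)) then popTrailingA result.dropLast
  else result
termination_by result.length
decreasing_by
  have : result.length ≠ 0 := fun h0 => h (List.eq_nil_of_length_eq_zero h0)
  simp [List.length_dropLast]; omega

def strip_noise_py (lines : List String) : List String :=
  popTrailingA (stripLoopA lines false [])

-- ===== PORT B =====
-- 'while i < len(lines) and _is_noise_line(lines[i].strip()): i += 1'
def fwdB (lines : List String) (i : Nat) : Nat :=
  if h : i < lines.length then
    if isNoiseLine (PySem.Str.strip lines[i]) then fwdB lines (i + 1) else i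
  else i
termination_by lines.length - i

-- 'while j > i and _is_noise_line(lines[j-1].strip()): j -= 1'
def bwdB (lines : List String) (i j : Nat) : Nat :=
  if h : i < j then
    if isNoiseLine (PySem.Str.strip (lines.getD (j - 1) "")) then bwdB lines i (j - 1) else j
  else j
termination_by j

def strip_noise_py_alt (lines : List String) : List String :=
  let i := fwdB lines 0
  let j := bwdB lines i lines.length
  PySem.List.slice lines (some (i : Int)) (some (j : Int))

-- ===== PRECONDITION & SPEC =====
def Spec_strip_noise_py (lines : List String) (out : List String) : Prop := out = strip_noise_py_alt lines
instance (lines : List String) (out : List String) : Decidable (Spec_strip_noise_py lines out) := by unfold Spec_strip_noise_py; infer_instance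

-- ===== CLAIM (what is proved, stated in full; the proofs are below) =====
def Claim_equal_strip_noise_py : Prop := ∀ (lines : List String), Dom_strip_noise_py lines → Spec_strip_noise_py lines (strip_noise_py lines)

-- ===== LEMMAS AND PROOFS =====

def noiseP (l : String) : Bool := isNoiseLine (PySem.Str.strip l)

theorem stripLoopA_true (xs : List String) : ∀ acc, stripLoopA xs true acc = acc ++ xs := by
  induction xs with
  | nil => simp [stripLoopA]
  | cons l rest ih => intro acc; simp [stripLoopA, ih]

theorem stripLoopA_false (xs : List String) :
    stripLoopA xs false [] = xs.dropWhile noiseP := by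
  induction xs with
  | nil => simp [stripLoopA]
  | cons l rest ih =>
    by_cases h : isNoiseLine (PySem.Str.strip l) = true
    · simp [stripLoopA, List.dropWhile, noiseP, h, ih]
    · simp [stripLoopA, List.dropWhile, noiseP, h, stripLoopA_true]

theorem popTrailingA_eq (xs : List String) :
    popTrailingA xs = (xs.reverse.dropWhile noiseP).reverse := by
  induction hn : xs.length using Nat.strong_induction_on generalizing xs with
  | _ n ih =>
    by_cases h : xs = []
    · subst h; simp [popTrailingA]
    · have hsplit : xs.dropLast ++ [xs.getLast h] = xs := List.dropLast_append_getLast h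
      have hrev : xs.reverse = xs.getLast h :: xs.dropLast.reverse := by
        conv_lhs => rw [← hsplit]
        simp
      have hlen : xs.dropLast.length < n := by
        have : xs.length ≠ 0 := fun h0 => h (List.eq_nil_of_length_eq_zero h0)
        simp [List.length_dropLast]; omega
      rw [popTrailingA, dif_neg h]
      by_cases hp : isNoiseLine (PySem.Str.strip (xs.getLast h)) = true
      · rw [if_pos hp, ih _ hlen _ rfl, hrev, List.dropWhile_cons]
        have : noiseP (xs.getLast h) = true := hp
        simp [this]
      · rw [if_neg hp, hrev, List.dropWhile_cons]
        have : noiseP (xs.getLast h) = false := by simp [noiseP, hp]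
        simp [this, hsplit]

theorem fwdB_drop (lines : List String) : ∀ i, lines.drop (fwdB lines i) = (lines.drop i).dropWhile noiseP := by
  intro i
  induction hn : lines.length - i using Nat.strong_induction_on generalizing i with
  | _ n ih =>
    rw [fwdB]
    by_cases h : i < lines.length
    · have hd : lines.drop i = lines[i] :: lines.drop (i + 1) := List.drop_eq_getElem_cons h
      by_cases hp : isNoiseLine (PySem.Str.strip lines[i]) = true
      · rw [dif_pos h, if_pos hp, ih (lines.length - (i + 1)) (by omega) (i + 1) rfl,
          hd, List.dropWhile_cons]
        have : noiseP lines[i] = true := hp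
        simp [this]
      · rw [dif_pos h, if_neg hp, hd, List.dropWhile_cons]
        have : noiseP lines[i] = false := by simp [noiseP, hp]
        simp [this, ← hd]
    · rw [dif_neg h]
      have : lines.length ≤ i := by omega
      simp [List.drop_eq_nil_of_le this]

theorem fwdB_le (lines : List String) : ∀ i, i ≤ fwdB lines i ∧ fwdB lines i ≤ max i lines.length := by
  intro i
  induction hn : lines.length - i using Nat.strong_induction_on generalizing i with
  | _ n ih =>
    rw [fwdB]
    by_cases h : i < lines.length
    · by_cases hp : isNoiseLine (PySem.Str.strip lines[i]) = true
      · rw [dif_pos h, if_pos hp]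
        have := ih (lines.length - (i + 1)) (by omega) (i + 1) rfl
        omega
      · rw [dif_pos h, if_neg hp]; omega
    · rw [dif_neg h]; omega

theorem bwdB_take (lines : List String) : ∀ j i, i ≤ j → j ≤ lines.length →
    ((lines.take (bwdB lines i j)).drop i) = (((lines.take j).drop i).reverse.dropWhile noiseP).reverse := by
  intro j
  induction j with
  | zero => intro i hij hlen; rw [bwdB, dif_neg (by omega)]
            have : i = 0 := by omega
            simp [this]
  | succ j ih =>
    intro i hij hlen
    rw [bwdB]
    by_cases h : i < j + 1
    · have hj : j < lines.length := by omega
      have hij' : i ≤ j := by omega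
      have hdrop : (lines.take (j + 1)).drop i = (lines.take j).drop i ++ [lines[j]] := by
        have htk : lines.take (j + 1) = lines.take j ++ [lines[j]] := by
          rw [List.take_add_one, List.getElem?_eq_getElem hj]; rfl
        have hlentake : i ≤ (lines.take j).length := by simp; omega
        rw [htk, List.drop_append_of_le_length hlentake]
      have hget : lines.getD (j + 1 - 1) "" = lines[j] := by
        simp [List.getD, List.getElem?_eq_getElem hj]
      by_cases hp : isNoiseLine (PySem.Str.strip lines[j]) = true
      · rw [dif_pos h, hget, if_pos hp]
        have hnp : noiseP lines[j] = true := hp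
        have := ih i hij' (by omega)
        simp only [Nat.add_sub_cancel]
        rw [this, hdrop]
        simp [hnp]
      · rw [dif_pos h, hget, if_neg hp, hdrop]
        have hnp : noiseP lines[j] = false := by simp [noiseP, hp]
        rw [List.reverse_append]
        simp [hnp]
    · rw [dif_neg h]
      have : i = j + 1 := by omega
      simp [this]

-- ===== VERDICT (by name: the statement is the Claim_ definition above) =====
theorem strip_noise_py_spec : Claim_equal_strip_noise_py := by
  intro lines _
  unfold Spec_strip_noise_py strip_noise_py strip_noise_py_alt
  set i := fwdB lines 0 with hi
  set j := bwdB lines i lines.length with hj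
  have hile : i ≤ lines.length := by
    have := fwdB_le lines 0; omega
  have hslice : PySem.List.slice lines (some (i : Int)) (some (j : Int)) = (lines.take j).drop i := by
    rw [PySem.List.slice_natCast, List.drop_take]
  rw [hslice, stripLoopA_false, popTrailingA_eq]
  have hB := bwdB_take lines lines.length i hile (le_refl _)
  rw [← hj] at hB
  rw [hB]
  congr 2
  have hF := fwdB_drop lines 0
  simp only [List.drop_zero] at hF
  rw [← hi] at hF
  rw [List.take_length, ← hF]
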